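-- pv_equiv track=rewrite | github.com/vpandey-om/lipidomics-metabolomics | scripts/individual_volcano.py | _find_group_x
-- ===== SOURCE A (Python) =====
-- def _find_group_x(cols_shown, group_name):
--     """
--     Prefer exact 'POI7'/'POI8' columns if present.
--     Else first column starting with that prefix (e.g., POI7_1).
--     Else fallback to column index 0 or 1 respectively.
--     """
--     # exact match
--     try:
--         return cols_shown.index(group_name)
--     except ValueError:
--         pass
--     # prefix match
--     for i, c in enumerate(cols_shown):
--         if str(c).startswith(group_name):
--             return i
--     # fallback
--     return 0 if group_name == "POI7" else 1
-- ===== SOURCE B (Python) =====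
-- def _find_group_x(cols_shown, group_name):
--     """Rank each column (0 = exact, 1 = prefix, 2 = no match) and keep the
--     lexicographic minimum (rank, index); return its index if it matched,
--     else the fallback."""
--     best = (2, 0)
--     for i, c in enumerate(cols_shown):
--         k = 0 if c == group_name else (1 if str(c).startswith(group_name) else 2)
--         if (k, i) < best:
--             best = (k, i)
--     if best[0] < 2:
--         return best[1]
--     return 0 if group_name == "POI7" else 1
-- ===== Notes on version B (the rewrite author's own statement) =====
-- stated objective: alternative
-- what changed: Replaces A's two separate scans (.index for the exact match, then an enumerate loop for the prefix match) by one fold that computes the lexicographic minimum of (match-rank, index) pairs, where rank 0 = exact, 1 = prefix, 2 = none.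
import Mathlib
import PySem

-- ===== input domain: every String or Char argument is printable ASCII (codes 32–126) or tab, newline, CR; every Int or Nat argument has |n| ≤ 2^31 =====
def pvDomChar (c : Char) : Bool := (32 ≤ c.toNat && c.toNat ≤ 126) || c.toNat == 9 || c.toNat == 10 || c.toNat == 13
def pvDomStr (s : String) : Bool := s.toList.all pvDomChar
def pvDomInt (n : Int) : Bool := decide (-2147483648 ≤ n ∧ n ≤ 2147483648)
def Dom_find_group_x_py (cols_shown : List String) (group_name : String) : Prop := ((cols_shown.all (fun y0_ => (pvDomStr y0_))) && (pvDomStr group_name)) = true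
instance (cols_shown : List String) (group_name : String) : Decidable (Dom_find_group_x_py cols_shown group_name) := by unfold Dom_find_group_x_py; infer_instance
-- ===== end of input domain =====

-- One honest line: B replaces A's two separate scans (exact .index scan, then a
-- prefix loop) by a single fold computing the lexicographic minimum of
-- (match-rank, index) pairs (0 = exact, 1 = prefix, 2 = none); same O(n) cost.

-- ===== PORT A =====
-- A's prefix loop: 'for i, c in enumerate(cols_shown): if str(c).startswith(group_name): return i'
def prefixLoopA (g : String) : List String → Int → Option Int
  | [], _ => none
  | c :: rest, i => if PySem.Str.startswith c g then some i else prefixLoopA g rest (i + 1)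

def find_group_x_py (cols_shown : List String) (group_name : String) : Int :=
  -- try: return cols_shown.index(group_name)  except ValueError: pass
  match PySem.List.index? cols_shown group_name with
  | some i => (i : Int)
  | none =>
    match prefixLoopA group_name cols_shown 0 with
    | some i => i
    | none => if group_name == "POI7" then 0 else 1

-- ===== PORT B =====
-- one fold step: compute the rank of this column and keep the smaller (rank, index) pair
def bStep (g : String) (best : Nat × Int) (p : Int × String) : Nat × Int :=
  let k : Nat := if p.2 = g then 0 else if PySem.Str.startswith p.2 g then 1 else 2
  if k < best.1 ∨ (k = best.1 ∧ p.1 < best.2) then (k, p.1) else best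

def find_group_x_py_alt (cols_shown : List String) (group_name : String) : Int :=
  let best := (PySem.List.enumerate cols_shown).foldl (bStep group_name) (2, 0)
  if best.1 < 2 then best.2 else if group_name == "POI7" then 0 else 1

-- ===== PRECONDITION & SPEC =====
def Spec_find_group_x_py (cols_shown : List String) (group_name : String) (out : Int) : Prop := out = find_group_x_py_alt cols_shown group_name
instance (cols_shown : List String) (group_name : String) (out : Int) : Decidable (Spec_find_group_x_py cols_shown group_name out) := by unfold Spec_find_group_x_py; infer_instance

-- ===== CLAIM =====
def Claim_equal_find_group_x_py : Prop := ∀ (cols_shown : List String) (group_name : String), Dom_find_group_x_py cols_shown group_name → Spec_find_group_x_py cols_shown group_name (find_group_x_py cols_shown group_name)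

-- ===== LEMMAS AND PROOFS =====
-- proof-only scan for the first exact match (factors A's .index call at an offset)
def exactScan (g : String) : List String → Int → Option Int
  | [], _ => none
  | c :: rest, i => if c = g then some i else exactScan g rest (i + 1)

theorem exactScan_eq_index? (g : String) (l : List String) (i : Int) :
    exactScan g l i = (PySem.List.index? l g).map (fun n => (n : Int) + i) := by
  induction l generalizing i with
  | nil => simp [exactScan, PySem.List.index?_eq_idxOf?]
  | cons c rest ih =>
    by_cases h : c = g
    · subst h
      rw [PySem.List.index?_cons_self]
      simp [exactScan]
    · rw [PySem.List.index?_cons_of_ne rest h]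
      simp only [exactScan, if_neg h, ih]
      cases PySem.List.index? rest g
      · simp
      · simp; ring

-- the fold computes: keep b if b is exact; else the first exact match if any;
-- else keep b if b is a prefix match; else the first prefix match if any; else b
theorem foldB (g : String) (l : List String) (s : Int) (b : Nat × Int)
    (hb2 : b.2 ≤ s) (hb1 : b.1 = 0 ∨ b.1 = 1 ∨ b.1 = 2) :
    (PySem.List.enumerate l s).foldl (bStep g) b =
      if b.1 = 0 then b
      else
        match exactScan g l s with
        | some e => (0, e)
        | none =>
          if b.1 = 1 then b
          else
            match prefixLoopA g l s with
            | some p => (1, p)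
            | none => b := by
  induction l generalizing s b with
  | nil =>
    rcases hb1 with h | h | h <;> simp [PySem.List.enumerate_nil, exactScan, prefixLoopA, h]
  | cons c rest ih =>
    rw [PySem.List.enumerate_cons, List.foldl_cons]
    by_cases hc : c = g
    · -- exact match at index s
      rcases hb1 with h | h | h
      · have hb' : bStep g b (s, c) = b := by
          simp [bStep, hc, h]
          exact fun hlt => absurd hlt (by omega)
        rw [hb', ih (s + 1) b (by omega) (Or.inl h)]
        simp [h]
      · have hb' : bStep g b (s, c) = (0, s) := by simp [bStep, hc, h]
        rw [hb', ih (s + 1) (0, s) (by simp) (Or.inl rfl)]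
        simp [h, exactScan, hc]
      · have hb' : bStep g b (s, c) = (0, s) := by simp [bStep, hc, h]
        rw [hb', ih (s + 1) (0, s) (by simp) (Or.inl rfl)]
        simp [h, exactScan, hc]
    · by_cases hp : PySem.Str.startswith c g = true
      all_goals rw [PySem.Str.startswith_eq] at hp
      · -- prefix (not exact) match at index s
        rcases hb1 with h | h | h
        · have hb' : bStep g b (s, c) = b := by simp [bStep, hc, hp, h]
          rw [hb', ih (s + 1) b (by omega) (Or.inl h)]
          simp [h]
        · have hb' : bStep g b (s, c) = b := by
            simp [bStep, hc, hp, h]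
            omega
          rw [hb', ih (s + 1) b (by omega) (Or.inr (Or.inl h))]
          simp [h, exactScan, hc]
        · have hb' : bStep g b (s, c) = (1, s) := by simp [bStep, hc, hp, h]
          rw [hb', ih (s + 1) (1, s) (by simp) (Or.inr (Or.inl rfl))]
          simp [h, exactScan, hc, prefixLoopA, hp]
      · -- no match at index s: b unchanged
        have hb' : bStep g b (s, c) = b := by
          simp [bStep, hc, hp]
          rcases hb1 with h | h | h <;> omega
        rw [hb', ih (s + 1) b (by omega) hb1]
        rcases hb1 with h | h | h <;>
          simp [h, exactScan, hc, prefixLoopA, hp]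

-- ===== VERDICT =====
theorem find_group_x_py_spec : Claim_equal_find_group_x_py := by
  intro cols g _
  unfold Spec_find_group_x_py find_group_x_py find_group_x_py_alt
  rw [foldB g cols 0 (2, 0) (by simp) (Or.inr (Or.inr rfl))]
  simp only [show (2 : Nat) ≠ 0 by decide, exactScan_eq_index?]
  cases hix : PySem.List.index? cols g with
  | some i => simp
  | none =>
    cases hpl : prefixLoopA g cols 0 <;> simp
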